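-- pv_equiv track=rewrite | github.com/ovidiu-andreescu/Cloud-Email-Analyzer | services/aggregate_verdicts/src/aggregate_verdicts/main.py | _virus_from_attachments
-- ===== SOURCE A (Python) =====
-- def _virus_from_attachments(items):
--     if not items:
--         return "SAFE"
--     verdicts = {i.get("scanVerdict", "PENDING") for i in items}
--     if "UNSAFE" in verdicts:
--         return "UNSAFE"
--     if verdicts.intersection({"SCAN_ERROR", "TIMEOUT", "SKIPPED_TOO_LARGE", "PENDING"}):
--         return "PARTIAL"
--     return "SAFE"
-- ===== SOURCE B (Python) =====
-- _SEVERITY = {"UNSAFE": 2, "SCAN_ERROR": 1, "TIMEOUT": 1, "SKIPPED_TOO_LARGE": 1, "PENDING": 1}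
-- _STATUS = ("SAFE", "PARTIAL", "UNSAFE")
--
-- def _virus_from_attachments(items):
--     # Max-reduction over severity ranks: worst rank decides the status.
--     worst = 0
--     for i in items:
--         worst = max(worst, _SEVERITY.get(i.get("scanVerdict", "PENDING"), 0))
--     return _STATUS[worst]
-- ===== Notes on version B (the rewrite author's own statement) =====
-- stated objective: alternative
-- what changed: Replaces the set construction with UNSAFE membership and intersection tests by a numeric max-reduction: each verdict is mapped through a severity table (UNSAFE=2, error/pending kinds=1, else 0), the maximum rank is folded over the items, and the result indexes a status tuple.
import Mathlib
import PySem

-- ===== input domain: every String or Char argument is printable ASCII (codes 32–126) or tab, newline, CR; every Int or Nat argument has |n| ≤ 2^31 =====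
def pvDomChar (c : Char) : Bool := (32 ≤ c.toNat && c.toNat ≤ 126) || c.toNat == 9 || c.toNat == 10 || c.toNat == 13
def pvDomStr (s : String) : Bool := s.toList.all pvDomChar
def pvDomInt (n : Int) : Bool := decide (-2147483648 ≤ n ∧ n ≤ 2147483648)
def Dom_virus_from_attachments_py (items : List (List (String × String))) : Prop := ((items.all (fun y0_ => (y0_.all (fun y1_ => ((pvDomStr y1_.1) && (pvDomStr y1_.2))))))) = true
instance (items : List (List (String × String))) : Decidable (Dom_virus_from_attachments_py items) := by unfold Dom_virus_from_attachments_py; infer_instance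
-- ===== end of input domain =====

-- B replaces A's verdict-set membership/intersection logic by a numeric
-- max-reduction over a severity table indexed into a status tuple (objective: alternative).

-- ===== PORT A =====
def virus_from_attachments_py (items : List (List (String × String))) : String :=
  if items = [] then "SAFE"
  else
    let verdicts : PySem.Set String :=
      PySem.Set.ofList (items.map (fun i => PySem.Dict.getD (PySem.Dict.mk i) "scanVerdict" "PENDING"))
    if PySem.Set.contains verdicts "UNSAFE" then "UNSAFE"
    else if PySem.Set.inter verdicts
        (PySem.Set.ofList ["SCAN_ERROR", "TIMEOUT", "SKIPPED_TOO_LARGE", "PENDING"]) ≠ [] then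
      "PARTIAL"
    else "SAFE"

-- ===== PORT B =====
-- _SEVERITY.get(v, 0): severity dict lookup with default 0
def pySeverity (v : String) : Nat :=
  PySem.Dict.getD
    (PySem.Dict.mk [("UNSAFE", 2), ("SCAN_ERROR", 1), ("TIMEOUT", 1), ("SKIPPED_TOO_LARGE", 1), ("PENDING", 1)])
    v 0

def virus_from_attachments_py_alt (items : List (List (String × String))) : String :=
  let worst := items.foldl
    (fun worst i => max worst (pySeverity (PySem.Dict.getD (PySem.Dict.mk i) "scanVerdict" "PENDING"))) 0
  -- _STATUS[worst]: exact, since worst ≤ 2 always (each severity is ≤ 2)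
  ["SAFE", "PARTIAL", "UNSAFE"].getD worst "SAFE"

-- ===== PRECONDITION & SPEC =====
def Spec_virus_from_attachments_py (items : List (List (String × String))) (out : String) : Prop := out = virus_from_attachments_py_alt items
instance (items : List (List (String × String))) (out : String) : Decidable (Spec_virus_from_attachments_py items out) := by unfold Spec_virus_from_attachments_py; infer_instance

-- ===== CLAIM (what is proved, stated in full; the proofs are below) =====
def Claim_equal_virus_from_attachments_py : Prop := ∀ (items : List (List (String × String))), Dom_virus_from_attachments_py items → Spec_virus_from_attachments_py items (virus_from_attachments_py items)

-- ===== LEMMAS AND PROOFS =====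

def pvVerdict (i : List (String × String)) : String :=
  PySem.Dict.getD (PySem.Dict.mk i) "scanVerdict" "PENDING"

theorem pySeverity_le (v : String) : pySeverity v ≤ 2 := by
  unfold pySeverity
  by_cases h1 : v = "UNSAFE"
  · simp [h1, PySem.Dict.getD, PySem.Dict.get?, PySem.Dict.mk]
  · by_cases h2 : v = "SCAN_ERROR"
    · simp [h2, PySem.Dict.getD, PySem.Dict.get?, PySem.Dict.mk]
    · by_cases h3 : v = "TIMEOUT"
      · simp [h3, PySem.Dict.getD, PySem.Dict.get?, PySem.Dict.mk]
      · by_cases h4 : v = "SKIPPED_TOO_LARGE"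
        · simp [h4, PySem.Dict.getD, PySem.Dict.get?, PySem.Dict.mk]
        · by_cases h5 : v = "PENDING"
          · simp [h5, PySem.Dict.getD, PySem.Dict.get?, PySem.Dict.mk]
          · have g1 : "UNSAFE" ≠ v := fun h => h1 h.symm
            have g2 : "SCAN_ERROR" ≠ v := fun h => h2 h.symm
            have g3 : "TIMEOUT" ≠ v := fun h => h3 h.symm
            have g4 : "SKIPPED_TOO_LARGE" ≠ v := fun h => h4 h.symm
            have g5 : "PENDING" ≠ v := fun h => h5 h.symm
            simp [g1, g2, g3, g4, g5, h1,
              PySem.Dict.getD, PySem.Dict.get?, PySem.Dict.mk]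

theorem pySeverity_eq_two_iff (v : String) : pySeverity v = 2 ↔ v = "UNSAFE" := by
  unfold pySeverity
  by_cases h1 : v = "UNSAFE"
  · simp [h1, PySem.Dict.getD, PySem.Dict.get?, PySem.Dict.mk]
  · by_cases h2 : v = "SCAN_ERROR"
    · simp [h1, h2, PySem.Dict.getD, PySem.Dict.get?, PySem.Dict.mk]
    · by_cases h3 : v = "TIMEOUT"
      · simp [h1, h2, h3, PySem.Dict.getD, PySem.Dict.get?, PySem.Dict.mk]
      · by_cases h4 : v = "SKIPPED_TOO_LARGE"
        · simp [h1, h2, h3, h4, PySem.Dict.getD, PySem.Dict.get?, PySem.Dict.mk]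
        · by_cases h5 : v = "PENDING"
          · simp [h1, h2, h3, h4, h5, PySem.Dict.getD, PySem.Dict.get?, PySem.Dict.mk]
          · have g1 : "UNSAFE" ≠ v := fun h => h1 h.symm
            have g2 : "SCAN_ERROR" ≠ v := fun h => h2 h.symm
            have g3 : "TIMEOUT" ≠ v := fun h => h3 h.symm
            have g4 : "SKIPPED_TOO_LARGE" ≠ v := fun h => h4 h.symm
            have g5 : "PENDING" ≠ v := fun h => h5 h.symm
            simp [g1, g2, g3, g4, g5, h1,
              PySem.Dict.getD, PySem.Dict.get?, PySem.Dict.mk]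

theorem pySeverity_eq_zero_iff (v : String) :
    pySeverity v = 0 ↔ (v ≠ "UNSAFE" ∧ v ∉ (["SCAN_ERROR", "TIMEOUT", "SKIPPED_TOO_LARGE", "PENDING"] : List String)) := by
  unfold pySeverity
  by_cases h1 : v = "UNSAFE"
  · simp [h1, PySem.Dict.getD, PySem.Dict.get?, PySem.Dict.mk]
  · by_cases h2 : v = "SCAN_ERROR"
    · simp [h1, h2, PySem.Dict.getD, PySem.Dict.get?, PySem.Dict.mk]
    · by_cases h3 : v = "TIMEOUT"
      · simp [h1, h2, h3, PySem.Dict.getD, PySem.Dict.get?, PySem.Dict.mk]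
      · by_cases h4 : v = "SKIPPED_TOO_LARGE"
        · simp [h1, h2, h3, h4, PySem.Dict.getD, PySem.Dict.get?, PySem.Dict.mk]
        · by_cases h5 : v = "PENDING"
          · simp [h1, h2, h3, h4, h5, PySem.Dict.getD, PySem.Dict.get?, PySem.Dict.mk]
          · have g1 : "UNSAFE" ≠ v := fun h => h1 h.symm
            have g2 : "SCAN_ERROR" ≠ v := fun h => h2 h.symm
            have g3 : "TIMEOUT" ≠ v := fun h => h3 h.symm
            have g4 : "SKIPPED_TOO_LARGE" ≠ v := fun h => h4 h.symm
            have g5 : "PENDING" ≠ v := fun h => h5 h.symm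
            simp [g1, g2, g3, g4, g5, h1, h2, h3, h4, h5,
              PySem.Dict.getD, PySem.Dict.get?, PySem.Dict.mk]

def pvWorst (l : List (List (String × String))) : Nat :=
  l.foldl (fun worst i => max worst (pySeverity (pvVerdict i))) 0

theorem pvWorst_shift (l : List (List (String × String))) (a : Nat) :
    l.foldl (fun worst i => max worst (pySeverity (pvVerdict i))) a
      = max a (l.foldl (fun worst i => max worst (pySeverity (pvVerdict i))) 0) := by
  induction l generalizing a with
  | nil => simp
  | cons i rest ih =>
    rw [List.foldl_cons, List.foldl_cons, ih, ih (max 0 _), Nat.zero_max, max_assoc]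

theorem pvWorst_cons (i : List (String × String)) (l : List (List (String × String))) :
    pvWorst (i :: l) = max (pySeverity (pvVerdict i)) (pvWorst l) := by
  unfold pvWorst
  rw [List.foldl_cons, pvWorst_shift, Nat.zero_max]

theorem pvWorst_le (l : List (List (String × String))) : pvWorst l ≤ 2 := by
  induction l with
  | nil => simp [pvWorst]
  | cons i rest ih =>
    rw [pvWorst_cons]
    exact max_le (pySeverity_le _) ih

theorem pvWorst_eq_two_iff (l : List (List (String × String))) :
    pvWorst l = 2 ↔ ∃ i ∈ l, pySeverity (pvVerdict i) = 2 := by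
  induction l with
  | nil => simp [pvWorst]
  | cons i rest ih =>
    rw [pvWorst_cons]
    have h1 := pySeverity_le (pvVerdict i)
    have h2 := pvWorst_le rest
    simp only [List.mem_cons]
    constructor
    · intro h
      by_cases hs : pySeverity (pvVerdict i) = 2
      · exact ⟨i, Or.inl rfl, hs⟩
      · have hr : pvWorst rest = 2 := by omega
        obtain ⟨j, hj, hs'⟩ := ih.mp hr
        exact ⟨j, Or.inr hj, hs'⟩
    · rintro ⟨j, hj | hj, hs⟩
      · subst hj; omega
      · have := ih.mpr ⟨j, hj, hs⟩; omega

theorem pvWorst_eq_zero_iff (l : List (List (String × String))) :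
    pvWorst l = 0 ↔ ∀ i ∈ l, pySeverity (pvVerdict i) = 0 := by
  induction l with
  | nil => simp [pvWorst]
  | cons i rest ih =>
    rw [pvWorst_cons]
    simp only [List.mem_cons, Nat.max_eq_zero_iff]
    constructor
    · rintro ⟨hi, hr⟩ j (hj | hj)
      · subst hj; exact hi
      · exact ih.mp hr j hj
    · intro h
      exact ⟨h i (Or.inl rfl), ih.mpr (fun j hj => h j (Or.inr hj))⟩

theorem inter_ne_nil_iff {α : Type} [BEq α] [LawfulBEq α] (s t : List α) :
    PySem.Set.inter s t ≠ [] ↔ ∃ x ∈ s, x ∈ t := by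
  constructor
  · intro h
    obtain ⟨x, hx⟩ := List.exists_mem_of_ne_nil _ h
    have := (PySem.Set.mem_inter (s := s) (t := t) (y := x)).mp hx
    exact ⟨x, this.1, this.2⟩
  · rintro ⟨x, hs, ht⟩ h
    have := (PySem.Set.mem_inter (s := s) (t := t) (y := x)).mpr ⟨hs, ht⟩
    rw [h] at this
    simp at this

-- ===== VERDICT (by name: the statement is the Claim_ definition above) =====
theorem virus_from_attachments_py_spec : Claim_equal_virus_from_attachments_py := by
  intro items _
  unfold Spec_virus_from_attachments_py virus_from_attachments_py virus_from_attachments_py_alt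
  have hBworst : (items.foldl
      (fun worst i => max worst (pySeverity (PySem.Dict.getD (PySem.Dict.mk i) "scanVerdict" "PENDING"))) 0)
      = pvWorst items := rfl
  rw [hBworst]
  have hle := pvWorst_le items
  have hA1 : (PySem.Set.contains
      (PySem.Set.ofList (items.map (fun i => PySem.Dict.getD (PySem.Dict.mk i) "scanVerdict" "PENDING")))
      "UNSAFE" = true) ↔ (∃ i ∈ items, pvVerdict i = "UNSAFE") := by
    rw [PySem.Set.contains_iff, PySem.Set.mem_ofList]
    simp only [List.mem_map]
    constructor
    · rintro ⟨i, hi, hv⟩; exact ⟨i, hi, hv⟩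
    · rintro ⟨i, hi, hv⟩; exact ⟨i, hi, hv⟩
  have hA2 : (PySem.Set.inter
      (PySem.Set.ofList (items.map (fun i => PySem.Dict.getD (PySem.Dict.mk i) "scanVerdict" "PENDING")))
      (PySem.Set.ofList ["SCAN_ERROR", "TIMEOUT", "SKIPPED_TOO_LARGE", "PENDING"]) ≠ []) ↔
      (∃ i ∈ items, pvVerdict i ∈ (["SCAN_ERROR", "TIMEOUT", "SKIPPED_TOO_LARGE", "PENDING"] : List String)) := by
    rw [inter_ne_nil_iff]
    simp only [PySem.Set.mem_ofList, List.mem_map]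
    constructor
    · rintro ⟨x, ⟨i, hi, rfl⟩, hx⟩; exact ⟨i, hi, hx⟩
    · rintro ⟨i, hi, hx⟩; exact ⟨_, ⟨i, hi, rfl⟩, hx⟩
  by_cases hnil : items = []
  · simp [hnil, pvWorst]
  · simp only [hnil, if_false]
    by_cases hu : ∃ i ∈ items, pvVerdict i = "UNSAFE"
    · have h2 : pvWorst items = 2 := by
        rw [pvWorst_eq_two_iff]
        obtain ⟨i, hi, hv⟩ := hu
        exact ⟨i, hi, (pySeverity_eq_two_iff _).mpr hv⟩
      rw [if_pos (hA1.mpr hu), h2]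
      rfl
    · rw [if_neg (fun h => hu (hA1.mp h))]
      by_cases hp : ∃ i ∈ items, pvVerdict i ∈ (["SCAN_ERROR", "TIMEOUT", "SKIPPED_TOO_LARGE", "PENDING"] : List String)
      · have h1 : pvWorst items = 1 := by
          have hne2 : pvWorst items ≠ 2 := by
            intro h
            obtain ⟨i, hi, hs⟩ := (pvWorst_eq_two_iff items).mp h
            exact hu ⟨i, hi, (pySeverity_eq_two_iff _).mp hs⟩
          have hne0 : pvWorst items ≠ 0 := by
            intro h0
            have h := (pvWorst_eq_zero_iff items).mp h0
            obtain ⟨i, hi, hv⟩ := hp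
            have := (pySeverity_eq_zero_iff (pvVerdict i)).mp (h i hi)
            exact this.2 hv
          omega
        rw [if_pos (hA2.mpr hp), h1]
        rfl
      · have h0 : pvWorst items = 0 := by
          rw [pvWorst_eq_zero_iff]
          intro i hi
          rw [pySeverity_eq_zero_iff]
          exact ⟨fun h => hu ⟨i, hi, h⟩, fun h => hp ⟨i, hi, h⟩⟩
        rw [if_neg (fun h => hp (hA2.mp h)), h0]
        rfl
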